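-- pv_equiv track=rewrite | github.com/mafshin/problem-solving-sample | problems/P017/P017.py | P017
-- ===== SOURCE A (Python) =====
-- def P017(number):
--     m = []
--     d = '+'
--     e = '0'
--     for c in range(0 , number + 1):
--         f = number - c
--         m.append(d * c + e * f)
--     return m
-- ===== SOURCE B (Python) =====
-- def P017(number):
--     master = '+' * number + '0' * number
--     return [master[number - c : 2 * number - c] for c in range(number + 1)]
-- ===== Notes on version B (the rewrite author's own statement) =====
-- stated objective: alternative
-- what changed: B precomputes one master string '+'*n + '0'*n and takes sliding-window slices master[n-c:2n-c] instead of concatenating freshly repeated character strings on each iteration.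
import Mathlib
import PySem

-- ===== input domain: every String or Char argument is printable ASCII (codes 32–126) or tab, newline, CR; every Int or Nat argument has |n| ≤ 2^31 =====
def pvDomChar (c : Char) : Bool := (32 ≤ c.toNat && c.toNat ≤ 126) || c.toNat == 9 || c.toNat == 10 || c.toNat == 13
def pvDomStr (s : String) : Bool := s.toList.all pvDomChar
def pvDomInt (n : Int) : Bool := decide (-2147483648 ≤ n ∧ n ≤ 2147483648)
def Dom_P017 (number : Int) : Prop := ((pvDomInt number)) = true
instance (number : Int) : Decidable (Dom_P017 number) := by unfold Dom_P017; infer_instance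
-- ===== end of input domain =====

-- B builds one master string '+'*n + '0'*n and slices a sliding window out of it,
-- instead of concatenating freshly repeated characters each iteration (objective: alternative).

-- Python 'ch * n' for a single char (negative n gives ''): Int.toNat clamps exactly as Python does.
def pyCharMul (ch : Char) (n : Int) : String := String.ofList (List.replicate n.toNat ch)

-- ===== PORT A =====
def P017 (number : Int) : List String :=
  (PySem.List.pyRange 0 (number + 1) 1).foldl
    (fun m c => m ++ [String.ofList ((pyCharMul '+' c).toList ++ (pyCharMul '0' (number - c)).toList)]) []

-- ===== PORT B =====
-- the Python string 'master' is modeled by its char list; master[a:b] is PySem.List.slice (exact).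
def P017_alt (number : Int) : List String :=
  let master : List Char := List.replicate number.toNat '+' ++ List.replicate number.toNat '0'
  (PySem.List.pyRange 0 (number + 1) 1).map
    (fun c => String.ofList (PySem.List.slice master (some (number - c)) (some (2 * number - c))))

-- ===== PRECONDITION & SPEC =====
def Spec_P017 (number : Int) (out : List String) : Prop := out = P017_alt number
instance (number : Int) (out : List String) : Decidable (Spec_P017 number out) := by unfold Spec_P017; infer_instance

-- ===== CLAIM (what is proved, stated in full; the proofs are below) =====
def Claim_equal_P017 : Prop := ∀ (number : Int), Dom_P017 number → Spec_P017 number (P017 number)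

-- ===== LEMMAS AND PROOFS =====

-- the window master[n-c : 2n-c] is exactly c pluses followed by n-c zeros
lemma window_eq (n c : Int) (h0 : 0 ≤ c) (h1 : c ≤ n) :
    PySem.List.slice (List.replicate n.toNat '+' ++ List.replicate n.toNat '0')
      (some (n - c)) (some (2 * n - c))
      = List.replicate c.toNat '+' ++ List.replicate (n - c).toNat '0' := by
  rw [PySem.List.slice_toNat _ (by omega) (by omega)]
  rw [List.drop_append, List.take_append]
  simp only [List.drop_replicate, List.take_replicate, List.length_replicate]
  have h2 : ((2 * n - c).toNat - (n - c).toNat) - (n.toNat - (n - c).toNat) = (n - c).toNat := by omega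
  rw [h2]
  congr 2 <;> omega

lemma foldl_append_singleton {α β : Type} (f : α → β) (xs : List α) (init : List β) :
    xs.foldl (fun m c => m ++ [f c]) init = init ++ xs.map f := by
  induction xs generalizing init with
  | nil => simp
  | cons x xs ih => simp [List.foldl, ih]

-- ===== VERDICT (by name: the statement is the Claim_ definition above) =====
theorem P017_spec : Claim_equal_P017 := by
  intro number _
  unfold Spec_P017 P017 P017_alt
  rw [foldl_append_singleton]
  simp only [List.nil_append]
  apply List.map_congr_left
  intro c hc
  rw [PySem.List.mem_pyRange_one] at hc
  rw [window_eq number c hc.1 (by omega)]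
  simp [pyCharMul, String.ofList]
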